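-- pv_equiv track=rewrite | github.com/zenmar/brain-data-deep-learning | Cascade/MultiClass/data_utils_multi.py | orderer_shuffling
-- ===== SOURCE A (Python) =====
-- def orderer_shuffling(rest_list,mem_list,math_list,motor_list):
--     ordered_list = []
--     for index, (value1, value2, value3, value4) in enumerate(zip(rest_list, mem_list, math_list, motor_list)):
--         ordered_list.append(value1)
--         ordered_list.append(value2)
--         ordered_list.append(value3)
--         ordered_list.append(value4)
--     return ordered_list
-- ===== SOURCE B (Python) =====
-- def orderer_shuffling(rest_list, mem_list, math_list, motor_list):
--     n = min(len(rest_list), len(mem_list), len(math_list), len(motor_list))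
--     result = [None] * (4 * n)
--     result[0::4] = rest_list[:n]
--     result[1::4] = mem_list[:n]
--     result[2::4] = math_list[:n]
--     result[3::4] = motor_list[:n]
--     return result
-- ===== Notes on version B (the rewrite author's own statement) =====
-- stated objective: alternative
-- what changed: B replaces the element-by-element zip loop by column-wise construction: it computes the common minimum length n, allocates a 4*n slot list and assigns each source into a strided slice result[k::4].
import Mathlib
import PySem

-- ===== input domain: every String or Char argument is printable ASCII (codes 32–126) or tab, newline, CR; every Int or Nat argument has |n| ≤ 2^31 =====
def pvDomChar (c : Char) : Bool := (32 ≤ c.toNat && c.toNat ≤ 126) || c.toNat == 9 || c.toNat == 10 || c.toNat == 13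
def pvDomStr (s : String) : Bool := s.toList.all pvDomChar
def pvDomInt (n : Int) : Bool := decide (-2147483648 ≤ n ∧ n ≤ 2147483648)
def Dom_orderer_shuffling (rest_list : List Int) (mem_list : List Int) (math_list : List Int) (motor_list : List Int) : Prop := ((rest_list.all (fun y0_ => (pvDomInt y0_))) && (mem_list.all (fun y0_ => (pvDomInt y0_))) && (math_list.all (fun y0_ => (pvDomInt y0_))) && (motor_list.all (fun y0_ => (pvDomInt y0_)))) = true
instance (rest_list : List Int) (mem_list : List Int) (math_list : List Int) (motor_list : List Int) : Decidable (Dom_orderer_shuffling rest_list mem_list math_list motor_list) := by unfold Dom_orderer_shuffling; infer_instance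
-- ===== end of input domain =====

-- B builds the interleaving column-wise (strided-slice assignment over a preallocated 4*n list)
-- instead of A's element-by-element zip loop; objective: alternative decomposition, same cost.


-- ===== PORT A =====
-- the zip-loop with the growing ordered_list accumulator (zip truncates at the shortest list)
def pvALoop : List Int → List Int → List Int → List Int → List Int → List Int
  | a :: as, b :: bs, c :: cs, d :: ds, acc =>
      pvALoop as bs cs ds (acc ++ [a] ++ [b] ++ [c] ++ [d])
  | _, _, _, _, acc => acc

def orderer_shuffling (rest_list : List Int) (mem_list : List Int) (math_list : List Int) (motor_list : List Int) : List Int :=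
  pvALoop rest_list mem_list math_list motor_list []

-- ===== PORT B =====
-- slice assignment result[k::4] = src[:n] ported index-wise: slot i receives element i/4 of
-- source i%4; exact because every index i/4 is < n, the length of each truncated source.
def orderer_shuffling_alt (rest_list : List Int) (mem_list : List Int) (math_list : List Int) (motor_list : List Int) : List Int :=
  let n := min (min (min rest_list.length mem_list.length) math_list.length) motor_list.length
  (List.range (4 * n)).map (fun i =>
    if i % 4 = 0 then (rest_list.take n).getD (i / 4) 0
    else if i % 4 = 1 then (mem_list.take n).getD (i / 4) 0
    else if i % 4 = 2 then (math_list.take n).getD (i / 4) 0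
    else (motor_list.take n).getD (i / 4) 0)

-- ===== PRECONDITION & SPEC =====
def Spec_orderer_shuffling (rest_list : List Int) (mem_list : List Int) (math_list : List Int) (motor_list : List Int) (out : List Int) : Prop := out = orderer_shuffling_alt rest_list mem_list math_list motor_list
instance (rest_list : List Int) (mem_list : List Int) (math_list : List Int) (motor_list : List Int) (out : List Int) : Decidable (Spec_orderer_shuffling rest_list mem_list math_list motor_list out) := by unfold Spec_orderer_shuffling; infer_instance

-- ===== CLAIM (what is proved, stated in full; the proofs are below) =====
def Claim_equal_orderer_shuffling : Prop := ∀ (rest_list : List Int) (mem_list : List Int) (math_list : List Int) (motor_list : List Int), Dom_orderer_shuffling rest_list mem_list math_list motor_list → Spec_orderer_shuffling rest_list mem_list math_list motor_list (orderer_shuffling rest_list mem_list math_list motor_list)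

-- ===== LEMMAS AND PROOFS =====

/-- canonical 4-way interleaving, the meeting point of the two proofs -/
def pvItl : List Int → List Int → List Int → List Int → List Int
  | a :: as, b :: bs, c :: cs, d :: ds => a :: b :: c :: d :: pvItl as bs cs ds
  | _, _, _, _ => []

theorem pvALoop_acc (r m ma mo : List Int) (acc : List Int) :
    pvALoop r m ma mo acc = acc ++ pvALoop r m ma mo [] := by
  induction r generalizing m ma mo acc with
  | nil => simp [pvALoop]
  | cons a as ih =>
    cases m with
    | nil => simp [pvALoop]
    | cons b bs =>
      cases ma with
      | nil => simp [pvALoop]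
      | cons c cs =>
        cases mo with
        | nil => simp [pvALoop]
        | cons d ds =>
          rw [pvALoop, pvALoop, ih, ih (acc := [] ++ [a] ++ [b] ++ [c] ++ [d])]
          simp

theorem pvA_eq_itl (r m ma mo : List Int) :
    pvALoop r m ma mo [] = pvItl r m ma mo := by
  induction r generalizing m ma mo with
  | nil => simp [pvALoop, pvItl]
  | cons a as ih =>
    cases m with
    | nil => simp [pvALoop, pvItl]
    | cons b bs =>
      cases ma with
      | nil => simp [pvALoop, pvItl]
      | cons c cs =>
        cases mo with
        | nil => simp [pvALoop, pvItl]
        | cons d ds =>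
          rw [pvALoop, pvALoop_acc, pvItl, ih]
          simp

theorem pvB_eq_itl (n : ℕ) :
    ∀ (r m ma mo : List Int),
      min (min (min r.length m.length) ma.length) mo.length = n →
      (List.range (4 * n)).map (fun i =>
        if i % 4 = 0 then (r.take n).getD (i / 4) 0
        else if i % 4 = 1 then (m.take n).getD (i / 4) 0
        else if i % 4 = 2 then (ma.take n).getD (i / 4) 0
        else (mo.take n).getD (i / 4) 0) = pvItl r m ma mo := by
  induction n with
  | zero =>
    intro r m ma mo h
    rcases r with _ | ⟨a, as⟩ <;> rcases m with _ | ⟨b, bs⟩ <;>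
      rcases ma with _ | ⟨c, cs⟩ <;> rcases mo with _ | ⟨d, ds⟩ <;>
      simp [pvItl] at h ⊢
  | succ k ih =>
    intro r m ma mo h
    rcases r with _ | ⟨a, as⟩ <;> rcases m with _ | ⟨b, bs⟩ <;>
      rcases ma with _ | ⟨c, cs⟩ <;> rcases mo with _ | ⟨d, ds⟩ <;>
      simp at h
    · -- all four lists nonempty
      have hn : min (min (min as.length bs.length) cs.length) ds.length = k := by omega
      have hr : 4 * (k + 1) = 4 + 4 * k := by omega
      rw [pvItl, ← ih as bs cs ds hn, hr]
      have h1 : (List.range (4 * k)).map (fun i => 4 + i) = List.range' 4 (4 * k) := by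
        simp [List.range'_eq_map_range]
      have hsplit : List.range (4 + 4 * k) =
          [0, 1, 2, 3] ++ (List.range (4 * k)).map (fun i => 4 + i) := by
        rw [h1, List.range_eq_range',
          show [0, 1, 2, 3] = List.range' 0 4 1 from rfl,
          show List.range' 4 (4 * k) 1 = List.range' (0 + 1 * 4) (4 * k) 1 from rfl,
          List.range'_append]
      rw [hsplit]
      simp only [List.map_append, List.map_map, List.map_cons, List.map_nil]
      norm_num [List.getD, Function.comp, Nat.add_mod_left,
        Nat.add_div_right, Nat.add_comm 4]

theorem orderer_shuffling_spec : Claim_equal_orderer_shuffling := by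
  intro r m ma mo _
  unfold Spec_orderer_shuffling orderer_shuffling orderer_shuffling_alt
  rw [pvA_eq_itl, ← pvB_eq_itl (min (min (min r.length m.length) ma.length) mo.length) r m ma mo rfl]
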